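-- pv_equiv track=rewrite | github.com/tsani/coding-cat-public | modulo-3/mutation_1.py | modulo_3
-- ===== SOURCE A (Python) =====
-- def modulo_3(str:str) -> str:
--     """
--     Incorrect remainders used in modular operation
--     """
--     list1=[]
--     list2=[]
--     list3=[]
--     for x, char in enumerate(str):
--         if x%3==1:#the remainder should start at 0 and be up to 2
--             list1.append(char)
--         if x%3==2:
--             list2.append(char)
--         if x%3==3:
--             list3.append(char)
--     return "".join(list1+list2+list3)
-- ===== SOURCE B (Python) =====
-- def modulo_3(str: str) -> str:
--     return str[1::3] + str[2::3]
-- ===== Notes on version B (the rewrite author's own statement) =====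
-- stated objective: simpler
-- what changed: Replaces the index loop with three accumulator lists by two closed-form stride slices str[1::3] + str[2::3] (the never-filled third list disappears).
import Mathlib
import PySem

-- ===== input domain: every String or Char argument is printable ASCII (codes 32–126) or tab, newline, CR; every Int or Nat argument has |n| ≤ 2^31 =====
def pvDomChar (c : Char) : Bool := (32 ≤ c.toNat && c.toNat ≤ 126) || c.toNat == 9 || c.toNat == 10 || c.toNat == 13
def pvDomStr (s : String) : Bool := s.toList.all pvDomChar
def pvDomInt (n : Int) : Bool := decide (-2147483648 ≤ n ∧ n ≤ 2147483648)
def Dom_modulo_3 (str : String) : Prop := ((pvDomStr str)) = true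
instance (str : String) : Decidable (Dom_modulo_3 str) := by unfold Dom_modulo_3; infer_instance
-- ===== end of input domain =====

-- B replaces A's enumerate loop with three accumulator lists by two stride slices str[1::3] + str[2::3] (simpler; same result).


-- ===== PORT A =====
-- "".join of a list of single-character strings is String.ofList of the char list (exact here).
def modulo_3 (str : String) : String :=
  let res := (PySem.List.enumerate str.toList 0).foldl
    (fun (st : List Char × List Char × List Char) (p : Int × Char) =>
      let l1 := if PySem.Int.mod p.1 3 = 1 then st.1 ++ [p.2] else st.1
      let l2 := if PySem.Int.mod p.1 3 = 2 then st.2.1 ++ [p.2] else st.2.1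
      let l3 := if PySem.Int.mod p.1 3 = 3 then st.2.2 ++ [p.2] else st.2.2
      (l1, l2, l3)) ([], [], [])
  String.ofList (res.1 ++ res.2.1 ++ res.2.2)

-- ===== PORT B =====
-- string stride slices and + ported on the char-list side; slice? is none only for step 0, so the getD [] default is never taken.
def modulo_3_alt (str : String) : String :=
  String.ofList ((PySem.List.slice? str.toList (some 1) none 3).getD [] ++
                 (PySem.List.slice? str.toList (some 2) none 3).getD [])

-- ===== PRECONDITION & SPEC =====
def Spec_modulo_3 (str : String) (out : String) : Prop := out = modulo_3_alt str
instance (str : String) (out : String) : Decidable (Spec_modulo_3 str out) := by unfold Spec_modulo_3; infer_instance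

-- ===== CLAIM (what is proved, stated in full; the proofs are below) =====
def Claim_equal_modulo_3 : Prop := ∀ (str : String), Dom_modulo_3 str → Spec_modulo_3 str (modulo_3 str)

-- ===== LEMMAS AND PROOFS =====

-- sel xs a: the elements of xs at positions p with (p + (3 - a)) % 3 = 0, i.e. xs[a::3] for a ∈ {1, 2}
def sel {α : Type} : List α → Nat → List α
  | [], _ => []
  | x :: r, 0 => x :: sel r 2
  | _ :: r, a + 1 => sel r a

lemma filterMap_range_sel {α : Type} :
    ∀ (xs : List α) (a m : Nat), xs.length ≤ a + 3 * m →
      List.filterMap (fun k => xs[(a + 3 * k)]?) (List.range m) = sel xs a := by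
  intro xs
  induction xs with
  | nil => intro a m _; simp [sel]
  | cons x r ih =>
    intro a m h
    simp only [List.length_cons] at h
    cases a with
    | zero =>
      cases m with
      | zero => omega
      | succ m' =>
        rw [List.range_succ_eq_map]
        simp only [List.filterMap_cons, List.filterMap_map]
        have h0 : (x :: r)[(0 + 3 * 0)]? = some x := rfl
        rw [h0]
        have he : ∀ k : Nat, (x :: r)[(0 + 3 * (k + 1))]? = r[(2 + 3 * k)]? := by
          intro k
          have : 0 + 3 * (k + 1) = (2 + 3 * k) + 1 := by omega
          rw [this]; rfl
        simp only [Function.comp_def, he]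
        rw [ih 2 m' (by omega)]
        rfl
    | succ a' =>
      have he : ∀ k : Nat, (x :: r)[(a' + 1 + 3 * k)]? = r[(a' + 3 * k)]? := by
        intro k
        have : a' + 1 + 3 * k = (a' + 3 * k) + 1 := by omega
        rw [this]; rfl
      simp only [he]
      rw [ih a' m (by omega)]
      rfl

lemma slice3_sel1 {α : Type} (xs : List α) :
    PySem.List.slice? xs (some 1) none 3 = some (sel xs 1) := by
  simp only [PySem.List.slice?, PySem.List.sliceIndices]
  norm_num
  rcases xs with _ | ⟨x, r⟩
  · simp [sel]
  · have hmin : min (1:Int) ((x::r).length:Int) = 1 := by simp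
    rw [hmin]
    have h1 : (∀ k : Nat, (x::r)[((1:Int) + 3 * (k:Int)).toNat]? = (x::r)[(1 + 3*k)]?) := by
      intro k; congr 1
    simp only [h1]
    split_ifs with hc
    · apply filterMap_range_sel
      omega
    · have h0 : r.length = 0 := by simp only [List.length_cons] at hc; omega
      rcases r with _ | ⟨y, t⟩
      · simp [sel]
      · simp at h0

lemma slice3_sel2 {α : Type} (xs : List α) :
    PySem.List.slice? xs (some 2) none 3 = some (sel xs 2) := by
  simp only [PySem.List.slice?, PySem.List.sliceIndices]
  norm_num
  rcases xs with _ | ⟨x, r⟩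
  · simp [sel]
  · rcases r with _ | ⟨y, t⟩
    · simp [sel]
    · have hmin : min (2:Int) (((x::y::t)).length:Int) = 2 := by
        simp only [List.length_cons]; omega
      rw [hmin]
      have h1 : (∀ k : Nat, (x::y::t)[((2:Int) + 3 * (k:Int)).toNat]? = (x::y::t)[(2 + 3*k)]?) := by
        intro k; congr 1
      simp only [h1]
      split_ifs with hc
      · apply filterMap_range_sel
        omega
      · have h0 : t.length = 0 := by simp only [List.length_cons] at hc; omega
        rcases t with _ | _
        · simp [sel]
        · simp at h0

theorem foldA :
    ∀ (xs : List Char) (s : Int) (l1 l2 l3 : List Char), PySem.Int.mod s 3 = 0 →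
      (PySem.List.enumerate xs s).foldl
        (fun (st : List Char × List Char × List Char) (p : Int × Char) =>
          let a1 := if PySem.Int.mod p.1 3 = 1 then st.1 ++ [p.2] else st.1
          let a2 := if PySem.Int.mod p.1 3 = 2 then st.2.1 ++ [p.2] else st.2.1
          let a3 := if PySem.Int.mod p.1 3 = 3 then st.2.2 ++ [p.2] else st.2.2
          (a1, a2, a3)) (l1, l2, l3)
      = (l1 ++ sel xs 1, l2 ++ sel xs 2, l3)
  | [], s, l1, l2, l3, hs => by simp [PySem.List.enumerate, sel]
  | [a], s, l1, l2, l3, hs => by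
    rw [PySem.Int.mod_eq_emod_of_pos (by omega)] at hs
    simp [PySem.List.enumerate, sel]
    refine ⟨?_, ?_, ?_⟩ <;> omega
  | [a, b], s, l1, l2, l3, hs => by
    rw [PySem.Int.mod_eq_emod_of_pos (by omega)] at hs
    simp [PySem.List.enumerate, sel]
    refine ⟨?_, ?_, ?_⟩ <;> first | omega | (split_ifs <;> first | rfl | omega)
  | a :: b :: c :: r, s, l1, l2, l3, hs => by
    have hs3 : PySem.Int.mod (s+1+1+1) 3 = 0 := by
      rw [PySem.Int.mod_eq_emod_of_pos (by omega)] at hs ⊢; omega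
    have ih := foldA r (s+1+1+1) (l1 ++ [b]) (l2 ++ [c]) l3 hs3
    rw [PySem.Int.mod_eq_emod_of_pos (by omega)] at hs
    have n1 : ¬ s % 3 = 1 := by omega
    have n2 : ¬ s % 3 = 2 := by omega
    have n3 : ¬ s % 3 = 3 := by omega
    have p1 : (s+1) % 3 = 1 := by omega
    have q2 : (s+1+1) % 3 = 2 := by omega
    simp only [PySem.List.enumerate_cons, List.foldl_cons,
      PySem.Int.mod_eq_emod_of_pos (show (0:Int) < 3 by omega)] at ih ⊢
    simp [n1, n2, n3, p1, q2] at ih ⊢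
    rw [ih]
    simp [sel]

-- ===== VERDICT (by name: the statement is the Claim_ definition above) =====
theorem modulo_3_spec : Claim_equal_modulo_3 := by
  intro str _
  unfold Spec_modulo_3 modulo_3 modulo_3_alt
  rw [slice3_sel1 str.toList, slice3_sel2 str.toList]
  have h := foldA str.toList 0 [] [] [] (by decide)
  simp only [h, Option.getD_some, List.nil_append, List.append_nil]
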